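-- pv_equiv track=rewrite | github.com/dei-biz/detegasa_product | src/compliance/matchers/material_matcher.py | resolve_material
-- ===== SOURCE A (Python) =====
-- MATERIAL_ALIASES: dict[str, str] = {
--     # Carbon steel
--     "carbon steel": "carbon_steel",
--     "cs": "carbon_steel",
--     "a516": "carbon_steel",
--     "astm a516": "carbon_steel",
--     "a106": "carbon_steel",
--     "a105": "carbon_steel",
--     # Low alloy
--     "low alloy": "low_alloy_steel",
--     "a335": "low_alloy_steel",
--     # SS 304
--     "304": "ss_304",
--     "ss 304": "ss_304",
--     "aisi 304": "ss_304",
--     "1.4301": "ss_304",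
--     "cf8": "ss_304",
--     # SS 316
--     "316": "ss_316",
--     "ss 316": "ss_316",
--     "aisi 316": "ss_316",
--     "1.4401": "ss_316",
--     "cf8m": "ss_316",
--     # SS 316L
--     "316l": "ss_316l",
--     "ss 316l": "ss_316l",
--     "aisi 316l": "ss_316l",
--     "aisi-316l": "ss_316l",
--     "1.4404": "ss_316l",
--     "1.4435": "ss_316l",
--     "1.4571": "ss_316l",
--     "316ti": "ss_316l",
--     # Duplex
--     "duplex": "duplex",
--     "2205": "duplex",
--     "1.4462": "duplex",
--     "saf 2205": "duplex",
--     # Super duplex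
--     "super duplex": "super_duplex",
--     "2507": "super_duplex",
--     "1.4410": "super_duplex",
--     "saf 2507": "super_duplex",
--     # Monel
--     "monel": "monel",
--     "monel 400": "monel",
--     # Inconel
--     "inconel": "inconel",
--     "inconel 625": "inconel",
--     "alloy 625": "inconel",
--     # Titanium
--     "titanium": "titanium",
--     "ti gr 2": "titanium",
--     # Hastelloy
--     "hastelloy": "hastelloy",
--     "hastelloy c276": "hastelloy",
--     # Austenitic stainless (generic -> 316)
--     "austenitic stainless steel": "ss_316",
--     "austenitic stainless": "ss_316",
--     "stainless steel": "ss_304",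
-- }
--
-- def resolve_material(designation: str) -> str | None:
--     """Resolve a material designation to a hierarchy key.
--
--     Returns None if the material is not recognized (e.g. polymers, elastomers).
--     """
--     lower = designation.lower().strip()
--
--     # Direct alias match
--     if lower in MATERIAL_ALIASES:
--         return MATERIAL_ALIASES[lower]
--
--     # Partial match — check if any alias is contained in the designation
--     for alias, key in sorted(MATERIAL_ALIASES.items(), key=lambda x: -len(x[0])):
--         if alias in lower:
--             return key
--
--     return None
-- ===== SOURCE B (Python) =====
-- # Alias table grouped into (key, ";"-separated aliases) runs, in the same
-- # overall alias order as the original dict.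
-- MATERIAL_GROUPS: list[tuple[str, str]] = [
--     ("carbon_steel", "carbon steel;cs;a516;astm a516;a106;a105"),
--     ("low_alloy_steel", "low alloy;a335"),
--     ("ss_304", "304;ss 304;aisi 304;1.4301;cf8"),
--     ("ss_316", "316;ss 316;aisi 316;1.4401;cf8m"),
--     ("ss_316l", "316l;ss 316l;aisi 316l;aisi-316l;1.4404;1.4435;1.4571;316ti"),
--     ("duplex", "duplex;2205;1.4462;saf 2205"),
--     ("super_duplex", "super duplex;2507;1.4410;saf 2507"),
--     ("monel", "monel;monel 400"),
--     ("inconel", "inconel;inconel 625;alloy 625"),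
--     ("titanium", "titanium;ti gr 2"),
--     ("hastelloy", "hastelloy;hastelloy c276"),
--     ("ss_316", "austenitic stainless steel;austenitic stainless"),
--     ("ss_304", "stainless steel"),
-- ]
--
--
-- def resolve_material(designation: str) -> str | None:
--     """Resolve a material designation to a hierarchy key.
--
--     One pass over the grouped alias table: keep the longest alias contained
--     in the normalised input (ties go to the earlier alias).  No per-call
--     sort and no separate exact-match phase: an exact match is always the
--     unique longest contained alias.
--     """
--     lower = designation.lower().strip()
--     best_key = None
--     best_len = -1
--     for key, aliases in MATERIAL_GROUPS:
--         for alias in aliases.split(";"):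
--             if len(alias) > best_len and alias in lower:
--                 best_key, best_len = key, len(alias)
--     return best_key
-- ===== Notes on version B (the rewrite author's own statement) =====
-- stated objective: alternative
-- what changed: Replaces A's flat alias dict with a grouped (key, ';'-separated aliases) table and A's two phases (exact dict lookup, then a first-match scan over the table re-sorted longest-first on every call) by one nested pass keeping the longest alias contained in the normalised input, ties to the earlier alias.
import Mathlib
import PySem

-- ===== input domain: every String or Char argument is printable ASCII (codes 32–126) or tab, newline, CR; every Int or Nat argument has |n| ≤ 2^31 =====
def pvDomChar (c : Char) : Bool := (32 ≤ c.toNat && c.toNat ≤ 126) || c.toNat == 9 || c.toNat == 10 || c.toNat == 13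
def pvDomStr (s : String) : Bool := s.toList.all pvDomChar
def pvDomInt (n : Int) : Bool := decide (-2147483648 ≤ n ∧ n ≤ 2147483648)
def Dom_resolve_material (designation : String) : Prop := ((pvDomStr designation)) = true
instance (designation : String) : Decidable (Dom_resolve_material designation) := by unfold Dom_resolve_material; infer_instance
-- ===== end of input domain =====

-- B replaces A's flat dict, direct-lookup phase and per-call longest-first sort by a grouped
-- (key, ";"-separated aliases) table scanned once, keeping the longest contained alias.

-- ===== PORT A =====
-- module constant MATERIAL_ALIASES (A's table, as A's Python has it)
def MATERIAL_ALIASES : PySem.Dict String String := PySem.Dict.ofList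
  [("carbon steel","carbon_steel"),("cs","carbon_steel"),("a516","carbon_steel"),
   ("astm a516","carbon_steel"),("a106","carbon_steel"),("a105","carbon_steel"),
   ("low alloy","low_alloy_steel"),("a335","low_alloy_steel"),
   ("304","ss_304"),("ss 304","ss_304"),("aisi 304","ss_304"),("1.4301","ss_304"),("cf8","ss_304"),
   ("316","ss_316"),("ss 316","ss_316"),("aisi 316","ss_316"),("1.4401","ss_316"),("cf8m","ss_316"),
   ("316l","ss_316l"),("ss 316l","ss_316l"),("aisi 316l","ss_316l"),("aisi-316l","ss_316l"),
   ("1.4404","ss_316l"),("1.4435","ss_316l"),("1.4571","ss_316l"),("316ti","ss_316l"),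
   ("duplex","duplex"),("2205","duplex"),("1.4462","duplex"),("saf 2205","duplex"),
   ("super duplex","super_duplex"),("2507","super_duplex"),("1.4410","super_duplex"),("saf 2507","super_duplex"),
   ("monel","monel"),("monel 400","monel"),
   ("inconel","inconel"),("inconel 625","inconel"),("alloy 625","inconel"),
   ("titanium","titanium"),("ti gr 2","titanium"),
   ("hastelloy","hastelloy"),("hastelloy c276","hastelloy"),
   ("austenitic stainless steel","ss_316"),("austenitic stainless","ss_316"),
   ("stainless steel","ss_304")]

-- A's 'for alias, key in sorted(...): if alias in lower: return key' loop
def resolveLoopA (lower : String) : List (String × String) → Option String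
  | [] => none
  | (als, key) :: rest =>
      if PySem.Str.isIn als lower then some key else resolveLoopA lower rest

def resolve_material (designation : String) : Option String :=
  let lower := PySem.Str.strip (PySem.Str.lower designation)
  match MATERIAL_ALIASES.get? lower with
  | some v => some v
  | none =>
      resolveLoopA lower
        (PySem.List.sorted MATERIAL_ALIASES.items (fun x => -(PySem.Str.len x.1)) false)

-- ===== PORT B =====
-- B's own table: (hierarchy key, ";"-separated aliases) groups
def MATERIAL_GROUPS : List (String × String) :=
  [("carbon_steel", "carbon steel;cs;a516;astm a516;a106;a105"),
   ("low_alloy_steel", "low alloy;a335"),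
   ("ss_304", "304;ss 304;aisi 304;1.4301;cf8"),
   ("ss_316", "316;ss 316;aisi 316;1.4401;cf8m"),
   ("ss_316l", "316l;ss 316l;aisi 316l;aisi-316l;1.4404;1.4435;1.4571;316ti"),
   ("duplex", "duplex;2205;1.4462;saf 2205"),
   ("super_duplex", "super duplex;2507;1.4410;saf 2507"),
   ("monel", "monel;monel 400"),
   ("inconel", "inconel;inconel 625;alloy 625"),
   ("titanium", "titanium;ti gr 2"),
   ("hastelloy", "hastelloy;hastelloy c276"),
   ("ss_316", "austenitic stainless steel;austenitic stainless"),
   ("ss_304", "stainless steel")]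

-- sep below is always the literal non-empty ";" so Python's split never raises; getD [] is unreachable
def resolve_material_alt (designation : String) : Option String :=
  let lower := PySem.Str.strip (PySem.Str.lower designation)
  (MATERIAL_GROUPS.foldl
    (fun best g =>
      ((PySem.Str.split? g.2 ";").getD []).foldl
        (fun best als =>
          if PySem.Str.len als > best.2 && PySem.Str.isIn als lower then (some g.1, PySem.Str.len als)
          else best)
        best)
    ((none : Option String), (-1 : Int))).1

-- ===== PRECONDITION & SPEC =====
def Spec_resolve_material (designation : String) (out : Option String) : Prop := out = resolve_material_alt designation
instance (designation : String) (out : Option String) : Decidable (Spec_resolve_material designation out) := by unfold Spec_resolve_material; infer_instance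

-- ===== CLAIM (what is proved, stated in full; the proofs are below) =====
def Claim_equal_resolve_material : Prop := ∀ (designation : String), Dom_resolve_material designation → Spec_resolve_material designation (resolve_material designation)

-- ===== LEMMAS AND PROOFS =====

-- the per-entry test 'alias in lower' and the alias length, as used by both loops
def pvQ (lower : String) (p : String × String) : Bool := PySem.Str.isIn p.1 lower
def pvLen (p : String × String) : Int := PySem.Str.len p.1

-- B's inner-loop body on (alias, key) pairs
def pvStep (lower : String) (acc : Option String × Int) (p : String × String) :
    Option String × Int :=
  if pvLen p > acc.2 && pvQ lower p then (some p.2, pvLen p) else acc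

-- B's grouped table, flattened to the (alias, key) pairs its loops visit
def pvFlat : List (String × String) :=
  MATERIAL_GROUPS.flatMap (fun g => ((PySem.Str.split? g.2 ";").getD []).map (fun als => (als, g.1)))

-- first entry of maximal pvLen among those satisfying pvQ with pvLen above threshold bl
def pvSel (lower : String) (bl : Int) : List (String × String) → Option (String × String)
  | [] => none
  | a :: l =>
      if pvQ lower a && decide (bl < pvLen a) then
        match pvSel lower (pvLen a) l with
        | some b => some b
        | none => some a
      else pvSel lower bl l

-- stable descending-by-length insertion sort (proof-side mirror of A's sorted(...))
def pvIns (a : String × String) : List (String × String) → List (String × String)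
  | [] => [a]
  | b :: l => if pvLen b ≤ pvLen a then a :: b :: l else b :: pvIns a l

def pvIsort : List (String × String) → List (String × String)
  | [] => []
  | a :: l => pvIns a (pvIsort l)

theorem pvLen_nonneg (p : String × String) : 0 ≤ pvLen p := by
  simp [pvLen, PySem.Str.len_eq]

theorem resolveLoopA_eq_find? (lower : String) (l : List (String × String)) :
    resolveLoopA lower l = (List.find? (pvQ lower) l).map Prod.snd := by
  induction l with
  | nil => rfl
  | cons a l ih =>
      obtain ⟨als, k⟩ := a
      cases h : PySem.Chars.isIn als.toList lower.toList <;>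
        simp [resolveLoopA, pvQ, h, ih]

theorem pvStep_pos (lower : String) (acc : Option String × Int) (p : String × String)
    (hq : pvQ lower p = true) (hl : acc.2 < pvLen p) :
    pvStep lower acc p = (some p.2, pvLen p) := by
  simp [pvStep, hq, hl]

theorem pvStep_neg (lower : String) (acc : Option String × Int) (p : String × String)
    (h : ¬(pvQ lower p = true ∧ acc.2 < pvLen p)) : pvStep lower acc p = acc := by
  rcases Decidable.em (pvQ lower p = true) with hq | hq
  · have : ¬ acc.2 < pvLen p := fun hl => h ⟨hq, hl⟩
    simp [pvStep, this]
  · simp [pvStep, Bool.eq_false_iff.mpr hq]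

-- B's nested loops are the flat pvStep fold over the flattened (alias, key) pairs
theorem nested_foldl (lower : String) (gs : List (String × String))
    (init : Option String × Int) :
    gs.foldl
      (fun best g =>
        ((PySem.Str.split? g.2 ";").getD []).foldl
          (fun best als =>
            if PySem.Str.len als > best.2 && PySem.Str.isIn als lower then (some g.1, PySem.Str.len als)
            else best)
          best)
      init =
    (gs.flatMap (fun g => ((PySem.Str.split? g.2 ";").getD []).map (fun als => (als, g.1)))).foldl
      (pvStep lower) init := by
  induction gs generalizing init with
  | nil => rfl
  | cons g gs ih =>
      rw [List.foldl_cons, List.flatMap_cons, List.foldl_append, List.foldl_map, ih]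
      rfl

theorem foldl_eq_pvSel (lower : String) (l : List (String × String))
    (bk : Option String) (bl : Int) :
    (l.foldl (pvStep lower) (bk, bl)).1 =
    match pvSel lower bl l with
    | none => bk
    | some b => some b.2 := by
  induction l generalizing bk bl with
  | nil => rfl
  | cons a l ih =>
      rw [List.foldl_cons]
      by_cases hq : pvQ lower a = true
      · by_cases hl : bl < pvLen a
        · rw [pvStep_pos lower (bk, bl) a hq hl, ih,
            show pvSel lower bl (a :: l) =
              match pvSel lower (pvLen a) l with
              | some b => some b
              | none => some a from by simp [pvSel, hq, hl]]
          cases pvSel lower (pvLen a) l <;> rfl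
        · rw [pvStep_neg lower (bk, bl) a (fun h => hl h.2), ih,
            show pvSel lower bl (a :: l) = pvSel lower bl l from by simp [pvSel, hl]]
      · rw [pvStep_neg lower (bk, bl) a (fun h => hq h.1), ih,
          show pvSel lower bl (a :: l) = pvSel lower bl l from by
            simp [pvSel, Bool.eq_false_iff.mpr hq]]

theorem pvSel_none (lower : String) (bl : Int) (l : List (String × String))
    (h : ∀ a ∈ l, ¬(pvQ lower a = true ∧ bl < pvLen a)) : pvSel lower bl l = none := by
  induction l with
  | nil => rfl
  | cons a l ih =>
      have ha := h a (List.mem_cons_self ..)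
      have hc : (pvQ lower a && decide (bl < pvLen a)) = false := by
        rcases Decidable.em (pvQ lower a = true) with hq | hq
        · simp only [hq, Bool.true_and, decide_eq_false_iff_not]
          exact fun hl => ha ⟨hq, hl⟩
        · simp [Bool.eq_false_iff.mpr hq]
      rw [show pvSel lower bl (a :: l) = pvSel lower bl l from by simp [pvSel, hc]]
      exact ih (fun b hb => h b (List.mem_cons_of_mem _ hb))

theorem pvSel_some (lower : String) (bl : Int) (l : List (String × String))
    (b : String × String) (h : pvSel lower bl l = some b) :
    b ∈ l ∧ pvQ lower b = true ∧ bl < pvLen b := by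
  induction l generalizing bl with
  | nil => simp [pvSel] at h
  | cons a l ih =>
      by_cases hc : (pvQ lower a && decide (bl < pvLen a)) = true
      · rw [show pvSel lower bl (a :: l) =
            match pvSel lower (pvLen a) l with
            | some c => some c
            | none => some a from by rw [pvSel, if_pos hc]] at h
        simp only [Bool.and_eq_true, decide_eq_true_eq] at hc
        rcases hs : pvSel lower (pvLen a) l with _ | c <;> rw [hs] at h <;> cases h
        · exact ⟨List.mem_cons_self .., hc.1, hc.2⟩
        · obtain ⟨hm, hq, hl⟩ := ih (pvLen a) hs
          exact ⟨List.mem_cons_of_mem _ hm, hq, lt_trans hc.2 hl⟩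
      · rw [show pvSel lower bl (a :: l) = pvSel lower bl l from by
            rw [pvSel, if_neg hc]] at h
        obtain ⟨hm, hq, hl⟩ := ih bl h
        exact ⟨List.mem_cons_of_mem _ hm, hq, hl⟩

theorem pvSel_thresh (lower : String) (l : List (String × String)) (bl bl' : Int)
    (hle : bl ≤ bl') :
    pvSel lower bl' l =
      match pvSel lower bl l with
      | none => none
      | some b => if bl' < pvLen b then some b else none := by
  induction l generalizing bl bl' with
  | nil => rfl
  | cons a l ih =>
      by_cases hq : pvQ lower a = true
      · by_cases h' : bl' < pvLen a
        · have hbl : bl < pvLen a := lt_of_le_of_lt hle h'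
          rw [show pvSel lower bl' (a :: l) =
                match pvSel lower (pvLen a) l with
                | some b => some b
                | none => some a from by simp [pvSel, hq, h'],
              show pvSel lower bl (a :: l) =
                match pvSel lower (pvLen a) l with
                | some b => some b
                | none => some a from by simp [pvSel, hq, hbl]]
          rcases hs : pvSel lower (pvLen a) l with _ | c
          · simp [h']
          · obtain ⟨_, _, hl⟩ := pvSel_some lower (pvLen a) l c hs
            simp [lt_trans h' hl]
        · rw [show pvSel lower bl' (a :: l) = pvSel lower bl' l from by simp [pvSel, h']]
          by_cases hbl : bl < pvLen a
          · rw [show pvSel lower bl (a :: l) =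
                  match pvSel lower (pvLen a) l with
                  | some b => some b
                  | none => some a from by simp [pvSel, hq, hbl],
                ih (pvLen a) bl' (by omega)]
            rcases pvSel lower (pvLen a) l with _ | c <;> simp [h']
          · rw [show pvSel lower bl (a :: l) = pvSel lower bl l from by simp [pvSel, hbl]]
            exact ih bl bl' hle
      · rw [show pvSel lower bl' (a :: l) = pvSel lower bl' l from by
              simp [pvSel, Bool.eq_false_iff.mpr hq],
            show pvSel lower bl (a :: l) = pvSel lower bl l from by
              simp [pvSel, Bool.eq_false_iff.mpr hq]]
        exact ih bl bl' hle

theorem mem_pvIns (y a : String × String) (s : List (String × String)) :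
    y ∈ pvIns a s ↔ y = a ∨ y ∈ s := by
  induction s with
  | nil => simp [pvIns]
  | cons b s ih =>
      by_cases h : pvLen b ≤ pvLen a
      · simp [pvIns, h, List.mem_cons]
      · simp only [pvIns, if_neg h, List.mem_cons, ih]
        tauto

theorem find?_pvIns_neg (lower : String) (a : String × String)
    (s : List (String × String)) (hq : pvQ lower a = false) :
    List.find? (pvQ lower) (pvIns a s) = List.find? (pvQ lower) s := by
  induction s with
  | nil => simp [pvIns, List.find?, hq]
  | cons b s ih =>
      by_cases h : pvLen b ≤ pvLen a
      · simp [pvIns, h, List.find?_cons, hq]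
      · simp only [pvIns, if_neg h, List.find?_cons]
        cases hb : pvQ lower b <;> simp [ih]

theorem pairwise_pvIns (a : String × String) (s : List (String × String))
    (hs : s.Pairwise (fun x y => pvLen y ≤ pvLen x)) :
    (pvIns a s).Pairwise (fun x y => pvLen y ≤ pvLen x) := by
  induction s with
  | nil => simp [pvIns]
  | cons b s ih =>
      rcases List.pairwise_cons.mp hs with ⟨hb, hs'⟩
      by_cases h : pvLen b ≤ pvLen a
      · rw [show pvIns a (b :: s) = a :: b :: s from by simp [pvIns, h]]
        exact List.pairwise_cons.mpr ⟨fun y hy => by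
          rcases List.mem_cons.mp hy with rfl | hy
          · exact h
          · exact le_trans (hb y hy) h, hs⟩
      · rw [show pvIns a (b :: s) = b :: pvIns a s from by simp [pvIns, h]]
        refine List.pairwise_cons.mpr ⟨fun y hy => ?_, ih hs'⟩
        rcases (mem_pvIns y a s).mp hy with rfl | hy'
        · omega
        · exact hb y hy'

theorem pairwise_pvIsort (l : List (String × String)) :
    (pvIsort l).Pairwise (fun x y => pvLen y ≤ pvLen x) := by
  induction l with
  | nil => simp [pvIsort]
  | cons a l ih => exact pairwise_pvIns a (pvIsort l) ih

theorem find?_pvIns_pos (lower : String) (a : String × String)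
    (s : List (String × String)) (hq : pvQ lower a = true)
    (hs : s.Pairwise (fun x y => pvLen y ≤ pvLen x)) :
    List.find? (pvQ lower) (pvIns a s) =
      match List.find? (pvQ lower) s with
      | none => some a
      | some b => if pvLen a < pvLen b then some b else some a := by
  induction s with
  | nil => simp [pvIns, List.find?, hq]
  | cons b s ih =>
      rcases List.pairwise_cons.mp hs with ⟨hb, hs'⟩
      by_cases h : pvLen b ≤ pvLen a
      · rw [show pvIns a (b :: s) = a :: b :: s from by simp [pvIns, h],
          List.find?_cons_of_pos hq]
        rcases hf : List.find? (pvQ lower) (b :: s) with _ | c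
        · rfl
        · have hc : c ∈ b :: s := List.mem_of_find?_eq_some hf
          have hcb : pvLen c ≤ pvLen b := by
            rcases List.mem_cons.mp hc with rfl | hc'
            · exact le_refl _
            · exact hb c hc'
          have hno : ¬ (pvLen a < pvLen c) := by omega
          simp [hno]
      · rw [show pvIns a (b :: s) = b :: pvIns a s from by simp [pvIns, h]]
        cases hbq : pvQ lower b
        · rw [List.find?_cons_of_neg (by simp [hbq]),
            List.find?_cons_of_neg (by simp [hbq]), ih hs']
        · rw [List.find?_cons_of_pos hbq, List.find?_cons_of_pos hbq]
          simp [show pvLen a < pvLen b by omega]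

theorem find?_pvIsort_eq_pvSel (lower : String) (l : List (String × String)) :
    List.find? (pvQ lower) (pvIsort l) = pvSel lower (-1) l := by
  induction l with
  | nil => rfl
  | cons a l ih =>
      have hpos : (-1 : Int) < pvLen a := lt_of_lt_of_le (by norm_num) (pvLen_nonneg a)
      by_cases hq : pvQ lower a = true
      · rw [show pvIsort (a :: l) = pvIns a (pvIsort l) from rfl,
          find?_pvIns_pos lower a (pvIsort l) hq (pairwise_pvIsort l), ih,
          show pvSel lower (-1) (a :: l) =
            match pvSel lower (pvLen a) l with
            | some b => some b
            | none => some a from by simp [pvSel, hq, hpos],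
          pvSel_thresh lower l (-1) (pvLen a) (by omega)]
        rcases pvSel lower (-1) l with _ | b
        · rfl
        · by_cases hl : pvLen a < pvLen b <;> simp [hl]
      · rw [show pvIsort (a :: l) = pvIns a (pvIsort l) from rfl,
          find?_pvIns_neg lower a (pvIsort l) (Bool.eq_false_iff.mpr hq), ih,
          show pvSel lower (-1) (a :: l) = pvSel lower (-1) l from by
            simp [pvSel, Bool.eq_false_iff.mpr hq]]

theorem pvSel_unique (lower : String) (bl : Int) (l : List (String × String))
    (k : String) (v : String) (hnd : l.Nodup) (hm : (k, v) ∈ l)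
    (hq : pvQ lower (k, v) = true) (hbl : bl < pvLen (k, v))
    (hmax : ∀ a ∈ l, pvQ lower a = true → pvLen a < pvLen (k, v) ∨ a = (k, v)) :
    pvSel lower bl l = some (k, v) := by
  induction l generalizing bl with
  | nil => simp at hm
  | cons a l ih =>
      rcases List.nodup_cons.mp hnd with ⟨hna, hnd'⟩
      by_cases hak : a = (k, v)
      · subst hak
        rw [show pvSel lower bl ((k, v) :: l) =
              match pvSel lower (pvLen (k, v)) l with
              | some b => some b
              | none => some (k, v) from by simp [pvSel, hq, hbl]]
        have hnone : pvSel lower (pvLen (k, v)) l = none := by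
          apply pvSel_none
          intro b hb hcontra
          rcases hmax b (List.mem_cons_of_mem _ hb) hcontra.1 with h1 | h1
          · omega
          · exact hna (h1 ▸ hb)
        rw [hnone]
      · have hm' : (k, v) ∈ l := by
          rcases List.mem_cons.mp hm with h1 | h1
          · exact absurd h1.symm hak
          · exact h1
        by_cases hc : (pvQ lower a && decide (bl < pvLen a)) = true
        · rw [show pvSel lower bl (a :: l) =
                match pvSel lower (pvLen a) l with
                | some b => some b
                | none => some a from by rw [pvSel, if_pos hc]]
          simp only [Bool.and_eq_true, decide_eq_true_eq] at hc
          have hlt : pvLen a < pvLen (k, v) := by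
            rcases hmax a (List.mem_cons_self ..) hc.1 with h1 | h1
            · exact h1
            · exact absurd h1 hak
          rw [ih (pvLen a) hnd' hm' hlt (fun b hb => hmax b (List.mem_cons_of_mem _ hb))]
        · rw [show pvSel lower bl (a :: l) = pvSel lower bl l from by rw [pvSel, if_neg hc]]
          exact ih bl hnd' hm' hbl (fun b hb => hmax b (List.mem_cons_of_mem _ hb))

theorem dict_get?_mem (l : List (String × String)) (k v : String)
    (h : (PySem.Dict.mk l).get? k = some v) : (k, v) ∈ l := by
  induction l with
  | nil => simp [PySem.Dict.get?] at h
  | cons a l ih =>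
      obtain ⟨k', v'⟩ := a
      rw [PySem.Dict.get?_mk_cons] at h
      by_cases hk : (k' == k) = true
      · rw [if_pos hk] at h
        cases h
        simp only [beq_iff_eq] at hk
        subst hk
        exact List.mem_cons_self ..
      · rw [if_neg hk] at h
        exact List.mem_cons_of_mem _ (ih h)

-- facts about the literal tables: B's flattened table IS A's item list, A's Dict form,
-- A's sorted order, uniqueness
set_option maxRecDepth 40000 in
theorem flat_eq : pvFlat = MATERIAL_ALIASES.items := by decide

set_option maxRecDepth 40000 in
theorem items_eq : MATERIAL_ALIASES = PySem.Dict.mk MATERIAL_ALIASES.items := by decide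

set_option maxRecDepth 40000 in
theorem sorted_eq :
    PySem.List.sorted MATERIAL_ALIASES.items (fun x => -(PySem.Str.len x.1)) false =
      pvIsort MATERIAL_ALIASES.items := by decide

set_option maxRecDepth 40000 in
theorem nodup_items : MATERIAL_ALIASES.items.Nodup := by decide

set_option maxRecDepth 40000 in
theorem nodup_keys : (MATERIAL_ALIASES.items.map Prod.fst).Nodup := by decide

-- A and the flat pvStep fold agree for every already-normalised string 'lower'
theorem core (lower : String) :
    (match MATERIAL_ALIASES.get? lower with
     | some v => some v
     | none =>
         resolveLoopA lower
           (PySem.List.sorted MATERIAL_ALIASES.items (fun x => -(PySem.Str.len x.1)) false)) =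
    (MATERIAL_ALIASES.items.foldl (pvStep lower) ((none : Option String), (-1 : Int))).1 := by
  rw [foldl_eq_pvSel lower MATERIAL_ALIASES.items none (-1)]
  rcases hget : MATERIAL_ALIASES.get? lower with _ | v
  · rw [resolveLoopA_eq_find?, sorted_eq, find?_pvIsort_eq_pvSel]
    rcases pvSel lower (-1) MATERIAL_ALIASES.items with _ | b <;> rfl
  · have hm : (lower, v) ∈ MATERIAL_ALIASES.items :=
      dict_get?_mem MATERIAL_ALIASES.items lower v (by rw [← items_eq]; exact hget)
    have hq : pvQ lower (lower, v) = true :=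
      (PySem.Str.isIn_iff_infix lower lower).mpr (List.infix_refl _)
    have hmax : ∀ a ∈ MATERIAL_ALIASES.items, pvQ lower a = true →
        pvLen a < pvLen (lower, v) ∨ a = (lower, v) := by
      intro a ha haq
      have hinf : a.1.toList <:+: lower.toList := (PySem.Str.isIn_iff_infix a.1 lower).mp haq
      have hlen : a.1.toList.length ≤ lower.toList.length := hinf.length_le
      rcases lt_or_eq_of_le hlen with h1 | h1
      · left
        simp only [pvLen, PySem.Str.len_eq]
        omega
      · right
        have hk : a.1 = lower := String.toList_inj.mp (hinf.eq_of_length h1)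
        exact List.inj_on_of_nodup_map nodup_keys ha hm hk
    rw [pvSel_unique lower (-1) MATERIAL_ALIASES.items lower v nodup_items hm hq
      (lt_of_lt_of_le (by norm_num) (pvLen_nonneg _)) hmax]

-- ===== VERDICT (by name: the statement is the Claim_ definition above) =====
set_option maxRecDepth 40000 in
set_option maxHeartbeats 2000000 in
theorem resolve_material_spec : Claim_equal_resolve_material := by
  intro designation _
  have h := congrArg Prod.fst
    (nested_foldl (PySem.Str.strip (PySem.Str.lower designation)) MATERIAL_GROUPS
      ((none : Option String), (-1 : Int)))
  have hc := core (PySem.Str.strip (PySem.Str.lower designation))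
  rw [show (MATERIAL_GROUPS.flatMap
        (fun g => ((PySem.Str.split? g.2 ";").getD []).map (fun als => (als, g.1)))) =
      MATERIAL_ALIASES.items from flat_eq] at h
  unfold Spec_resolve_material resolve_material resolve_material_alt
  exact hc.trans h.symm
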